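-- pv_equiv track=rewrite | github.com/atulguptag/TCS-Coding-Questions | 01-02-2024/Question/Python Solutions/Solution3.py | fare
-- ===== SOURCE A (Python) =====
-- import math
--
-- def fare(s,d):#NI-6,HA-3
--     path=[800,600,750,900,1400,1200,1100,1500]
--
--     stop=['TH','GA','IC','HA','TE','LU','NI','CA']
--
--     res=0
--
--     st=stop.index(s)#6
--
--     ed=stop.index(d)#3
--
--     while st!=ed:#7!=3
--         st=(st+1)%8#7,0
--         res=res+path[st]#path[7],path[0]
--
--     return math.ceil(res/200)
-- ===== SOURCE B (Python) =====
-- import math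
--
-- def fare(s, d):
--     path = [800, 600, 750, 900, 1400, 1200, 1100, 1500]
--     stop = ['TH', 'GA', 'IC', 'HA', 'TE', 'LU', 'NI', 'CA']
--     st = stop.index(s)
--     ed = stop.index(d)
--     prefix = [0]
--     for x in path:
--         prefix.append(prefix[-1] + x)
--     if st <= ed:
--         res = prefix[ed + 1] - prefix[st + 1]
--     else:
--         res = prefix[8] - prefix[st + 1] + prefix[ed + 1]
--     return math.ceil(res / 200)
-- ===== Notes on version B (the rewrite author's own statement) =====
-- stated objective: alternative
-- what changed: Replaces A's step-by-step cyclic while loop (walking stop indices mod 8 and accumulating fares) with a prefix-sum table over path and a closed-form cyclic segment difference.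
-- outside the precondition, e.g. on fare('XX', 'HA'): A raises ValueError, B raises ValueError
import Mathlib
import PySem

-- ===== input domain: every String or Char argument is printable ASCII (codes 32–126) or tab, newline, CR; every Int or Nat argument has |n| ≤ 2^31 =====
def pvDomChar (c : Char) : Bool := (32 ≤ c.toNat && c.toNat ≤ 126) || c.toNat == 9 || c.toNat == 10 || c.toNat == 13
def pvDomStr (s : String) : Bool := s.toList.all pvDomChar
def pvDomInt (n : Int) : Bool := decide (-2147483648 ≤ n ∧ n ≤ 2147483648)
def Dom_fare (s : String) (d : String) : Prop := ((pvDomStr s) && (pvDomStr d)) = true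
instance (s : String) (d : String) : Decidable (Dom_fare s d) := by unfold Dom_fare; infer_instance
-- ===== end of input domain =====

-- B replaces A's step-by-step cyclic while loop by a prefix-sum table and a closed-form
-- segment difference (objective: alternative/simpler control flow; same tiny fixed cost).

-- ===== PORT A =====
-- the while loop; st and ed are list indices (Nat, from list.index), so Python's
-- (st+1)%8 is exactly Nat mod.  Inside Pre_ both are < 8, so the loop runs at most 7
-- times and fuel 8 makes the recursion total without changing any admitted computation.
def fareLoop (path : List Int) (fuel : Nat) (ed : Nat) (st : Nat) (res : Int) : Int :=
  match fuel with
  | 0 => res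
  | fuel + 1 =>
    if st ≠ ed then
      let st' := (st + 1) % 8
      fareLoop path fuel ed st' (res + (PySem.List.pyGet? path (st' : Int)).getD 0)
    else res

def fare (s : String) (d : String) : Int :=
  let path : List Int := [800, 600, 750, 900, 1400, 1200, 1100, 1500]
  let stop : List String := ["TH", "GA", "IC", "HA", "TE", "LU", "NI", "CA"]
  match PySem.List.index? stop s, PySem.List.index? stop d with
  | some st, some ed =>
    let res := fareLoop path 8 ed st 0;
    -- math.ceil(res/200): exact ceiling division (float is exact at these magnitudes)
    -(PySem.Int.floordiv (-res) 200)
  | _, _ => 0  -- unreachable inside Pre_fare: list.index raises ValueError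

-- ===== PORT B =====
def fare_alt (s : String) (d : String) : Int :=
  let path : List Int := [800, 600, 750, 900, 1400, 1200, 1100, 1500]
  let stop : List String := ["TH", "GA", "IC", "HA", "TE", "LU", "NI", "CA"]
  match PySem.List.index? stop s with
  | none => 0  -- unreachable inside Pre_fare
  | some st =>
  match PySem.List.index? stop d with
  | none => 0  -- unreachable inside Pre_fare
  | some ed =>
    -- prefix = [0]; for x in path: prefix.append(prefix[-1] + x)
    let pre := path.foldl (fun acc x => acc ++ [(PySem.List.pyGet? acc (-1)).getD 0 + x]) [0]
    let res :=
      if st ≤ ed then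
        (PySem.List.pyGet? pre ((ed : Int) + 1)).getD 0 - (PySem.List.pyGet? pre ((st : Int) + 1)).getD 0
      else
        (PySem.List.pyGet? pre 8).getD 0 - (PySem.List.pyGet? pre ((st : Int) + 1)).getD 0
          + (PySem.List.pyGet? pre ((ed : Int) + 1)).getD 0;
    -- math.ceil(res/200): exact ceiling division (float is exact at these magnitudes)
    -(PySem.Int.floordiv (-res) 200)

-- ===== PRECONDITION & SPEC =====
-- Pre_ excludes exactly the inputs on which A raises ValueError (s or d not a stop name).
def Pre_fare (s : String) (d : String) : Prop := s ∈ ["TH", "GA", "IC", "HA", "TE", "LU", "NI", "CA"] ∧ d ∈ ["TH", "GA", "IC", "HA", "TE", "LU", "NI", "CA"]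
instance (s : String) (d : String) : Decidable (Pre_fare s d) := by unfold Pre_fare; infer_instance
def pvWitness_fare : String × String := ("NI", "HA")
def Spec_fare (s : String) (d : String) (out : Int) : Prop := out = fare_alt s d
instance (s : String) (d : String) (out : Int) : Decidable (Spec_fare s d out) := by unfold Spec_fare; infer_instance

-- ===== CLAIM (what is proved, stated in full; the proofs are below) =====
def Claim_equal_fare : Prop := ∀ (s : String) (d : String), Dom_fare s d → Pre_fare s d → Spec_fare s d (fare s d)

-- ===== LEMMAS AND PROOFS =====

-- ===== VERDICT (by name: the statement is the Claim_ definition above) =====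
theorem fare_spec : Claim_equal_fare := by
  intro s d _ hpre
  obtain ⟨hs, hd⟩ := hpre
  fin_cases hs <;> fin_cases hd <;> decide
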